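-- pv_equiv track=rewrite | github.com/mattfisc/python | arrayPrac.py | countClumps
-- ===== SOURCE A (Python) =====
-- def countClumps(a):
--     count = 0
--     double = False
--     for i in range(len(a)-1):
--         if a[i] == a[i+1]:
--             if double == False:
--                 count+=1
--             double = True
--         else:
--             double = False
--     return count
-- ===== SOURCE B (Python) =====
-- from itertools import groupby
--
-- def countClumps(a):
--     # group into maximal runs of equal adjacent elements, count runs of length >= 2
--     return sum(1 for _, g in groupby(a) if len(list(g)) >= 2)
-- ===== Notes on version B (the rewrite author's own statement) =====
-- stated objective: idiomatic
-- what changed: Replaces the stateful 'double'-flag pairwise index scan with itertools.groupby: split the list into maximal runs of equal consecutive elements and count the runs of length at least 2.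
import Mathlib
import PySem

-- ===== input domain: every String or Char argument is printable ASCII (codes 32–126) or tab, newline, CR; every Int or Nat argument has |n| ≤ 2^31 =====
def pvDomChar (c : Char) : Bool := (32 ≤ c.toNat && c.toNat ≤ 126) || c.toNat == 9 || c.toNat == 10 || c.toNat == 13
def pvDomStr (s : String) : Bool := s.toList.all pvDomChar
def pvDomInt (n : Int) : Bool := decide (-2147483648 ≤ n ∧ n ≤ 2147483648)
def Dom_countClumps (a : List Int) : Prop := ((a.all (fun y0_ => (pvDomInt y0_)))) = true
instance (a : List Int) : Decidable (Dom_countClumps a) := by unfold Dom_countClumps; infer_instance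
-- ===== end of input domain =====

-- B replaces A's stateful 'double'-flag pairwise scan by a groupby decomposition:
-- split into maximal runs of equal consecutive elements, count runs of length ≥ 2 (idiomatic).

-- ===== PORT A =====
-- loop body of A: state (count, double), index i; a[i]/a[i+1] are always in range for i in range(len(a)-1)
def pvStepA (a : List Int) (s : Int × Bool) (i : Int) : Int × Bool :=
  if PySem.List.pyGetD a i 0 = PySem.List.pyGetD a (i + 1) 0 then
    ((if s.2 = false then s.1 + 1 else s.1), true)
  else
    (s.1, false)

def countClumps (a : List Int) : Int :=
  ((PySem.List.pyRange 0 ((a.length : Int) - 1) 1).foldl (pvStepA a) (0, false)).1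

-- ===== PORT B =====
-- itertools.groupby(a) ported as List.splitBy (· == ·) (maximal runs of equal adjacent elements, in order)
def countClumps_alt (a : List Int) : Int :=
  ((a.splitBy (· == ·)).countP (fun g => 2 ≤ g.length) : Int)

-- ===== PRECONDITION & SPEC =====
def Spec_countClumps (a : List Int) (out : Int) : Prop := out = countClumps_alt a
instance (a : List Int) (out : Int) : Decidable (Spec_countClumps a out) := by unfold Spec_countClumps; infer_instance

-- ===== CLAIM (what is proved, stated in full; the proofs are below) =====
def Claim_equal_countClumps : Prop := ∀ (a : List Int), Dom_countClumps a → Spec_countClumps a (countClumps a)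

-- ===== LEMMAS AND PROOFS =====

-- pairwise recursion both programs are proved equal to
def pvClumpsAux : List Int → Bool → Int
  | [], _ => 0
  | [_], _ => 0
  | x :: y :: t, d =>
    (if x = y then (if d then 0 else 1) else 0) + pvClumpsAux (y :: t) (decide (x = y))

-- right-recursive run splitting, a proof-side handle for splitBy
def pvRuns : List Int → List (List Int)
  | [] => []
  | x :: t =>
    match pvRuns t with
    | (y :: g) :: rs => if x = y then (x :: y :: g) :: rs else [x] :: (y :: g) :: rs
    | _ => [[x]]

lemma pvRuns_cons (x : Int) (t : List Int) :
    pvRuns (x :: t) = match pvRuns t with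
      | (y :: g) :: rs => if x = y then (x :: y :: g) :: rs else [x] :: (y :: g) :: rs
      | _ => [[x]] := rfl

lemma pvRuns_cons_struct : ∀ (t : List Int) (y : Int),
    ∃ g rs, pvRuns (y :: t) = (y :: g) :: rs ∧ (g ≠ [] ↔ t.head? = some y) := by
  intro t
  induction t with
  | nil => intro y; exact ⟨[], [], by simp [pvRuns], by simp⟩
  | cons z t' ih =>
    intro y
    obtain ⟨g', rs', hg', _⟩ := ih z
    by_cases h : y = z
    · refine ⟨z :: g', rs', ?_, by simp [h]⟩
      rw [pvRuns_cons, hg']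
      simp [h]
    · refine ⟨[], (z :: g') :: rs', ?_, by simp [Ne.symm h]⟩
      rw [pvRuns_cons, hg']
      simp [h]

lemma pvGetD_shift (x : Int) (t : List Int) (i : Int) (h : 0 ≤ i) :
    PySem.List.pyGetD (x :: t) (i + 1) 0 = PySem.List.pyGetD t i 0 := by
  obtain ⟨k, rfl⟩ := Int.eq_ofNat_of_zero_le h
  have h1 : ((k : Int) + 1) = ((k + 1 : Nat) : Int) := by push_cast; ring
  rw [h1, PySem.List.pyGetD_natCast, PySem.List.pyGetD_natCast]
  simp

lemma pvStepA_shift (x : Int) (t : List Int) (s : Int × Bool) (i : Int) (h : 0 ≤ i) :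
    pvStepA (x :: t) s (i + 1) = pvStepA t s i := by
  unfold pvStepA
  rw [pvGetD_shift x t i h, pvGetD_shift x t (i + 1) (by omega)]

lemma pvFoldl_shift_list : ∀ (l : List Int) (x : Int) (t : List Int) (s : Int × Bool),
    (∀ i ∈ l, 0 ≤ i) →
      ((l.map (· + 1)).foldl (pvStepA (x :: t)) s = l.foldl (pvStepA t) s) := by
  intro l
  induction l with
  | nil => intro x t s _; rfl
  | cons i l' ih =>
    intro x t s hmem
    simp only [List.map_cons, List.foldl_cons]
    rw [pvStepA_shift x t s i (hmem i (by simp))]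
    exact ih x t _ (fun j hj => hmem j (by simp [hj]))

lemma pvRange_shift (n : Nat) :
    PySem.List.pyRange 1 ((n : Int) + 1) 1
      = (PySem.List.pyRange 0 (n : Int) 1).map (· + 1) := by
  rw [PySem.List.pyRange_one, PySem.List.pyRange_one]
  have h1 : (((n : Int) + 1) - 1).toNat = n := by omega
  have h2 : ((n : Int) - 0).toNat = n := by omega
  rw [h1, h2, List.map_map]
  apply List.map_congr_left
  intro k _
  simp only [Function.comp_apply]
  omega

lemma pvStepA_zero (x y : Int) (t : List Int) (s : Int × Bool) :
    pvStepA (x :: y :: t) s 0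
      = if x = y then ((if s.2 = false then s.1 + 1 else s.1), true) else (s.1, false) := by
  have h0 : PySem.List.pyGetD (x :: y :: t) ((0 : Nat) : Int) 0 = x := by
    rw [PySem.List.pyGetD_natCast]; rfl
  have h1 : PySem.List.pyGetD (x :: y :: t) ((1 : Nat) : Int) 0 = y := by
    rw [PySem.List.pyGetD_natCast]; rfl
  unfold pvStepA
  rw [show ((0 : Nat) : Int) = (0 : Int) from rfl] at h0
  rw [show ((1 : Nat) : Int) = (0 : Int) + 1 from rfl] at h1
  rw [h0, h1]

lemma pvLoopA_eq : ∀ (a : List Int) (c : Int) (d : Bool),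
    ((PySem.List.pyRange 0 ((a.length : Int) - 1) 1).foldl (pvStepA a) (c, d)).1
      = c + pvClumpsAux a d := by
  intro a
  induction a with
  | nil =>
    intro c d
    rw [PySem.List.pyRange_one_eq_nil (by norm_num)]
    simp [pvClumpsAux]
  | cons x t ih =>
    intro c d
    cases t with
    | nil =>
      rw [PySem.List.pyRange_one_eq_nil (by simp)]
      simp [pvClumpsAux]
    | cons y t' =>
      have hlen : ((x :: y :: t').length : Int) - 1 = ((y :: t').length : Int) := by
        simp
      rw [hlen]
      have hcons : PySem.List.pyRange 0 ((y :: t').length : Int) 1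
          = 0 :: PySem.List.pyRange 1 ((y :: t').length : Int) 1 :=
        PySem.List.pyRange_one_cons (by simp)
      rw [hcons, List.foldl_cons]
      have hn : ((y :: t').length : Int) = ((t'.length : Nat) : Int) + 1 := by simp
      rw [hn, pvRange_shift t'.length,
        pvFoldl_shift_list _ x (y :: t') _
          (fun i hi => ((PySem.List.mem_pyRange_one).mp hi).1)]
      have ht : ((t'.length : Nat) : Int) = (((y :: t').length : Int) - 1) := by simp
      rw [ht, pvStepA_zero]
      by_cases hxy : x = y
      · rw [if_pos hxy]
        cases d with
        | false =>
          simp only [ih]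
          simp [pvClumpsAux, hxy]
          ring
        | true =>
          simp only [ih]
          simp [pvClumpsAux, hxy]
      · rw [if_neg hxy]
        simp only [ih]
        simp [pvClumpsAux, hxy]

lemma pvSplitBy_loop_eq : ∀ (as : List Int) (b : Int) (r : List Int) (acc : List (List Int)),
    List.splitBy.loop (fun x y => x == y) as b r acc
      = acc.reverse ++ (match pvRuns as with
          | (y :: g) :: rs =>
            if b = y then ((b :: r).reverse ++ y :: g) :: rs
            else (b :: r).reverse :: (y :: g) :: rs
          | _ => [(b :: r).reverse]) := by
  intro as
  induction as with
  | nil => intro b r acc; simp [List.splitBy.loop, pvRuns]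
  | cons a as' ih =>
    intro b r acc
    by_cases hba : b = a
    · have hba' : (b == a) = true := by simp [hba]
      rw [List.splitBy.loop]
      simp only [hba']
      rw [ih, pvRuns_cons]
      subst hba
      cases as' with
      | nil => simp [pvRuns]
      | cons c as'' =>
        obtain ⟨g, rs', hg, _⟩ := pvRuns_cons_struct as'' c
        rw [hg]
        by_cases hbc : b = c
        · simp [hbc]
        · simp [hbc]
    · have hba' : (b == a) = false := by simp [hba]
      rw [List.splitBy.loop]
      simp only [hba']
      rw [ih, pvRuns_cons]
      cases as' with
      | nil => simp [pvRuns, hba]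
      | cons c as'' =>
        obtain ⟨g, rs', hg, _⟩ := pvRuns_cons_struct as'' c
        rw [hg]
        by_cases hac : a = c
        · have hbc : ¬ b = c := by rw [← hac]; exact hba
          simp [hac, hbc]
        · simp [hac, hba]

lemma pvSplitBy_eq_pvRuns (l : List Int) : l.splitBy (· == ·) = pvRuns l := by
  cases l with
  | nil => rfl
  | cons a as =>
    rw [List.splitBy, pvSplitBy_loop_eq, pvRuns_cons]
    cases as with
    | nil => simp [pvRuns]
    | cons c as' =>
      obtain ⟨g, rs', hg, _⟩ := pvRuns_cons_struct as' c
      rw [hg]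
      by_cases hac : a = c
      · simp [hac]
      · simp [hac]

lemma pvClumpsAux_true (y : Int) (t : List Int) :
    pvClumpsAux (y :: t) true
      = pvClumpsAux (y :: t) false - (if t.head? = some y then 1 else 0) := by
  cases t with
  | nil => simp [pvClumpsAux]
  | cons z t' =>
    by_cases h : y = z
    · simp [pvClumpsAux, h]
    · simp [pvClumpsAux, h, Ne.symm h]

lemma pvCount_runs_eq : ∀ (l : List Int),
    (((pvRuns l).countP (fun g => 2 ≤ g.length) : Nat) : Int) = pvClumpsAux l false := by
  intro l
  induction l with
  | nil => simp [pvRuns, pvClumpsAux]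
  | cons x t ih =>
    cases t with
    | nil => simp [pvRuns, pvClumpsAux]
    | cons y t' =>
      obtain ⟨g, rs, hg, hiff⟩ := pvRuns_cons_struct t' y
      rw [hg] at ih
      by_cases hxy : x = y
      · have hruns : pvRuns (x :: y :: t') = (x :: y :: g) :: rs := by
          rw [pvRuns_cons, hg]; simp [hxy]
        rw [hruns]
        simp only [pvClumpsAux, if_pos hxy, decide_eq_true hxy]
        rw [pvClumpsAux_true, ← ih]
        by_cases hgnil : g = []
        · have ht : ¬ (t'.head? = some y) := fun h => (hiff.mpr h) hgnil
          subst hgnil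
          simp [ht]
          omega
        · have ht : t'.head? = some y := hiff.mp hgnil
          have hlg : (decide (2 ≤ (y :: g).length)) = true := by
            cases g with
            | nil => exact absurd rfl hgnil
            | cons _ _ => simp
          simp [List.countP_cons, ht]
          omega
      · have hruns : pvRuns (x :: y :: t') = [x] :: (y :: g) :: rs := by
          rw [pvRuns_cons, hg]; simp [hxy]
        rw [hruns]
        simp only [pvClumpsAux, if_neg hxy]
        rw [show (decide (x = y)) = false by simp [hxy], ← ih]
        simp [List.countP_cons]

-- ===== VERDICT (by name: the statement is the Claim_ definition above) =====
theorem countClumps_spec : Claim_equal_countClumps := by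
  intro a _
  unfold Spec_countClumps countClumps countClumps_alt
  rw [pvSplitBy_eq_pvRuns, pvCount_runs_eq]
  have := pvLoopA_eq a 0 false
  simpa using this
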